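-- pv_equiv track=rewrite | github.com/pburakov/cs | solutions/arrays/single_one/__init__.py | freq_map
-- ===== SOURCE A (Python) =====
-- def freq_map(A):
--     """
--     Linear solution using frequency map.
--
--     Straightforward algorithm that scans the array and constructs a frequency map.
--
--     Complexity: O(n) time, O(n) space for frequency map
--     :param list[int] A: Input array
--     :return int: Missing number
--     """
--     M = {}
--     for i in A:
--         if i not in M:
--             M[i] = 0
--         M[i] += 1
--     for i in M:  # Find a single one in a frequency map
--         if M[i] < 2:
--             return i
--     return 0
-- ===== SOURCE B (Python) =====
-- def freq_map(A):
--     """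
--     Sort-and-group solution: sort a copy of A, sweep it once grouping equal
--     runs to collect the set of values that occur exactly once, then return
--     the first element of A that is in that set (0 if none).
--     """
--     S = sorted(A)
--     singles = set()
--     i = 0
--     while i < len(S):
--         j = i + 1
--         while j < len(S) and S[j] == S[i]:
--             j += 1
--         if j == i + 1:
--             singles.add(S[i])
--         i = j
--     for x in A:
--         if x in singles:
--             return x
--     return 0
-- ===== Notes on version B (the rewrite author's own statement) =====
-- stated objective: alternative
-- what changed: Replaced the frequency map by sort-and-group: B sorts a copy of A, sweeps the sorted list once collecting values whose run has length 1 into a set, then returns the first element of A found in that set (0 if none).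
import Mathlib
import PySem

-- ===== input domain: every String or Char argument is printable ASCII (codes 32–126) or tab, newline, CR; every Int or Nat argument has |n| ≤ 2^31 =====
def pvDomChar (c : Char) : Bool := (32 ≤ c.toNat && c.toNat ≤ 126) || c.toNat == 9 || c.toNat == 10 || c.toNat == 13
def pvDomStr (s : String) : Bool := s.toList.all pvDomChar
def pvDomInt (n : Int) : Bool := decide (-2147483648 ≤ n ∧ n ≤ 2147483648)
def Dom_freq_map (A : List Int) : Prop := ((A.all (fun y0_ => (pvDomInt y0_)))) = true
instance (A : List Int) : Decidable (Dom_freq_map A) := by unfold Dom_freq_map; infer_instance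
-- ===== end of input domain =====

-- B replaces A's frequency map by sort-and-group: sort a copy of A, sweep the sorted list
-- grouping equal runs to collect the set of values occurring exactly once, then return the
-- first element of A in that set (0 if none).

-- ===== PORT A =====
-- the second loop of A: 'for i in M: if M[i] < 2: return i' then 'return 0' (M[i] exact as getD: every key is present)
def pvScanA (M : PySem.Dict Int Int) : List Int → Int
  | [] => 0
  | k :: rest => if M.getD k 0 < 2 then k else pvScanA M rest

def freq_map (A : List Int) : Int :=
  let M := A.foldl (fun M i =>
      let M' := if M.contains i then M else M.insert i 0
      M'.insert i (M'.getD i 0 + 1)) PySem.Dict.empty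
  pvScanA M M.keys

-- ===== PORT B =====
-- the grouping while-loop over the sorted copy: each outer step consumes one run
-- (the inner 'while S[j] == S[i]' = takeWhile/dropWhile) and adds the value to
-- 'singles' when the run has length 1
def pvSingles (s : PySem.Set Int) : List Int → PySem.Set Int
  | [] => s
  | x :: rest =>
    let run := rest.takeWhile (fun y => y == x)
    let rest' := rest.dropWhile (fun y => y == x)
    if run.isEmpty then pvSingles (PySem.Set.add s x) rest' else pvSingles s rest'
  termination_by l => l.length
  decreasing_by
    all_goals
      simpa using Nat.lt_succ_of_le (List.length_dropWhile_le (fun y => y == x) rest)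

-- 'for x in A: if x in singles: return x' then 'return 0'
def pvFindIn (singles : PySem.Set Int) : List Int → Int
  | [] => 0
  | x :: rest => if singles.contains x then x else pvFindIn singles rest

def freq_map_alt (A : List Int) : Int :=
  pvFindIn (pvSingles PySem.Set.empty (PySem.List.sorted A (fun x => x) false)) A

-- ===== PRECONDITION & SPEC =====
def Spec_freq_map (A : List Int) (out : Int) : Prop := out = freq_map_alt A
instance (A : List Int) (out : Int) : Decidable (Spec_freq_map A out) := by unfold Spec_freq_map; infer_instance

-- ===== CLAIM (what is proved, stated in full; the proofs are below) =====
def Claim_equal_freq_map : Prop := ∀ (A : List Int), Dom_freq_map A → Spec_freq_map A (freq_map A)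

-- ===== LEMMAS AND PROOFS =====

-- ---- A side: freq_map A = first element of A with count 1 (0 if none) ----

-- A's building loop is Counter(A)
lemma pv_fold_eq_counter (A : List Int) :
    A.foldl (fun M i =>
      let M' := if M.contains i then M else M.insert i 0
      M'.insert i (M'.getD i 0 + 1)) PySem.Dict.empty = PySem.Dict.counter A := by
  rw [← PySem.Dict.foldl_insert_getD_add_one_eq_counter]
  apply PySem.List.foldl_congr_mem
  intro M i _
  by_cases h : M.contains i = true
  · simp [h]
  · simp only [h, if_neg Bool.false_ne_true, PySem.Dict.insert_insert_self,
      PySem.Dict.getD_insert_self]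
    rw [PySem.Dict.getD_of_not_contains M 0 (by simpa using h)]

lemma pvScanA_eq_find? (M : PySem.Dict Int Int) (l : List Int) :
    pvScanA M l = (l.find? (fun k => decide (M.getD k 0 < 2))).getD 0 := by
  induction l with
  | nil => rfl
  | cons k rest ih =>
    by_cases h : M.getD k 0 < 2 <;> simp [pvScanA, List.find?, h, ih]

lemma pv_find?_congr_mem {p q : Int → Bool} : ∀ (l : List Int),
    (∀ x ∈ l, p x = q x) → l.find? p = l.find? q
  | [], _ => rfl
  | x :: rest, h => by
    have hx := h x (by simp)
    by_cases hq : q x = true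
    · simp [List.find?, hx, hq]
    · have hq' : q x = false := by simpa using hq
      simp only [List.find?, hx, hq']
      exact pv_find?_congr_mem rest (fun y hy => h y (by simp [hy]))

-- Set.ofList keeps appending to the accumulator
lemma pv_foldl_add_append : ∀ (l : List Int) (s : PySem.Set Int),
    ∃ t, l.foldl PySem.Set.add s = s ++ t
  | [], s => ⟨[], by simp⟩
  | x :: rest, s => by
    obtain ⟨t, ht⟩ := pv_foldl_add_append rest (PySem.Set.add s x)
    by_cases h : x ∈ s
    · have hadd : PySem.Set.add s x = s := by simp [PySem.Set.add, h]
      exact ⟨t, by rw [List.foldl_cons, ht, hadd]⟩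
    · have hadd : PySem.Set.add s x = s ++ [x] := by simp [PySem.Set.add, h]
      exact ⟨x :: t, by rw [List.foldl_cons, ht, hadd]; simp⟩

-- scanning the dedup (first occurrences) finds the same first hit as scanning the list,
-- provided every element satisfying p occurs at most once
lemma pv_find?_ofList_aux (p : Int → Bool) : ∀ (l : List Int) (s : PySem.Set Int),
    (∀ x ∈ s, p x = false) → (∀ x, p x = true → l.count x ≤ 1) →
    (l.foldl PySem.Set.add s).find? p = l.find? p
  | [], s, hs, _ => by
    simp only [List.foldl_nil, List.find?_nil]
    exact List.find?_eq_none.mpr (fun x hx => by simp [hs x hx])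
  | x :: rest, s, hs, hc => by
    by_cases hp : p x = true
    · have hxs : x ∉ s := fun hmem => by simp [hs x hmem] at hp
      have hadd : PySem.Set.add s x = s ++ [x] := by
        simp [PySem.Set.add, hxs]
      obtain ⟨t, ht⟩ := pv_foldl_add_append rest (PySem.Set.add s x)
      rw [List.foldl_cons, ht, hadd]
      have hfs : s.find? p = none := List.find?_eq_none.mpr (fun x hx => by simp [hs x hx])
      simp [List.find?_append, hfs, List.find?, hp]
    · have hp' : p x = false := by simpa using hp
      have hmem : ∀ y ∈ PySem.Set.add s x, p y = false := by
        intro y hy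
        by_cases hys : y ∈ s
        · exact hs y hys
        · have hyx : y = x := by
            by_cases h : x ∈ s
            · exact absurd (by simpa [PySem.Set.add, h] using hy) hys
            · rcases (by simpa [PySem.Set.add, h] using hy : y ∈ s ∨ y = x) with h' | h'
              · exact absurd h' hys
              · exact h'
          simpa [hyx] using hp'
      have hc' : ∀ y, p y = true → rest.count y ≤ 1 := by
        intro y hy
        have := hc y hy
        have : rest.count y ≤ (x :: rest).count y := by
          rw [List.count_cons]; omega
        omega
      rw [List.foldl_cons]
      rw [pv_find?_ofList_aux p rest (PySem.Set.add s x) hmem hc']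
      simp [List.find?, hp']

lemma pv_freq_map_eq_find? (A : List Int) :
    freq_map A = (A.find? (fun x => PySem.List.count A x == 1)).getD 0 := by
  unfold freq_map
  rw [pv_fold_eq_counter]
  show pvScanA (PySem.Dict.counter A) (PySem.Dict.counter A).keys = _
  rw [PySem.Dict.keys_counter, pvScanA_eq_find?]
  have hcount : ∀ x, PySem.List.count A x = List.count x A := fun _ => rfl
  have h1 : (PySem.Set.ofList A).find? (fun k => decide ((PySem.Dict.counter A).getD k 0 < 2))
      = (PySem.Set.ofList A).find? (fun x => PySem.List.count A x == 1) := by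
    apply pv_find?_congr_mem
    intro x hx
    have hxA : x ∈ A := (PySem.Set.mem_ofList A x).mp hx
    have hge : 1 ≤ List.count x A := List.one_le_count_iff.mpr hxA
    rw [PySem.Dict.getD_counter, hcount]
    rcases Nat.lt_or_ge (List.count x A) 2 with h | h
    · have : List.count x A = 1 := by omega
      simp [this]
    · have : ¬ (List.count x A == 1) = true := by simp; omega
      simp only [this, decide_eq_false_iff_not]
      omega
  have h2 : (PySem.Set.ofList A).find? (fun x => PySem.List.count A x == 1)
      = A.find? (fun x => PySem.List.count A x == 1) := by
    rw [PySem.Set.ofList_eq_foldl]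
    apply pv_find?_ofList_aux
    · intro x hx; simp at hx
    · intro x hx
      have : List.count x A = 1 := by simpa [hcount] using hx
      simpa [hcount] using Nat.le_of_eq this
  rw [h1, h2]

-- ---- B side: membership in pvSingles of a sorted list is 'count = 1' ----

-- head of a dropWhile does not satisfy the predicate
lemma pv_dropWhile_head_false (p : Int → Bool) : ∀ (l : List Int) (h : Int) (t : List Int),
    l.dropWhile p = h :: t → p h = false
  | [], _, _, hx => by simp at hx
  | x :: rest, h, t, hx => by
    by_cases hp : p x = true
    · rw [List.dropWhile_cons_of_pos hp] at hx
      exact pv_dropWhile_head_false p rest h t hx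
    · have hp' : p x = false := by simpa using hp
      rw [List.dropWhile_cons_of_neg (by simp [hp'])] at hx
      cases hx
      exact hp'

lemma pv_singles_mem (y : Int) : ∀ (S : List Int) (s : PySem.Set Int),
    S.Pairwise (· ≤ ·) →
    (y ∈ pvSingles s S ↔ y ∈ s ∨ S.count y = 1)
  | [], s, _ => by simp [pvSingles]
  | x :: rest, s, hsort => by
    have hle : ∀ z ∈ rest, x ≤ z := (List.pairwise_cons.mp hsort).1
    have hrest : rest.Pairwise (· ≤ ·) := (List.pairwise_cons.mp hsort).2
    set t := rest.takeWhile (fun y => y == x) with ht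
    set d := rest.dropWhile (fun y => y == x) with hd
    have hsplit : rest = t ++ d := (List.takeWhile_append_dropWhile).symm
    have hdlen : d.length ≤ rest.length := List.length_dropWhile_le _ _
    have hdsorted : d.Pairwise (· ≤ ·) :=
      hrest.sublist (hsplit ▸ List.sublist_append_right t d)
    have htall : ∀ z ∈ t, z = x := by
      intro z hz
      have := List.mem_takeWhile_imp hz
      simpa using this
    have hxd : x ∉ d := by
      intro hxin
      cases hD : d with
      | nil => simp [hD] at hxin
      | cons h0 t0 =>
        have hh0 : (h0 == x) = false :=
          pv_dropWhile_head_false (fun y => y == x) rest h0 t0 (by rw [← hd, hD])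
        have hh0x : h0 ≠ x := by simpa using hh0
        have hxh0 : x ≤ h0 := hle h0 (by rw [hsplit, hD]; simp)
        have hlt : x < h0 := lt_of_le_of_ne hxh0 (fun e => hh0x e.symm)
        rw [hD] at hxin
        rcases List.mem_cons.mp hxin with h | h
        · exact hh0x h.symm
        · have : h0 ≤ x := ((List.pairwise_cons.mp (hD ▸ hdsorted)).1) x h
          omega
    have hcx : (x :: rest).count x = 1 + t.length := by
      rw [hsplit, List.count_cons_self, List.count_append]
      have ht0 : t.count x = t.length := List.count_eq_length.mpr (fun z hz => ((htall z hz).symm ▸ rfl))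
      have hd0 : d.count x = 0 := List.count_eq_zero.mpr hxd
      omega
    have hcy : y ≠ x → (x :: rest).count y = d.count y := by
      intro hyx
      have hbx : (y == x) = false := by simpa using hyx
      have ht0 : t.count y = 0 := List.count_eq_zero.mpr (fun hz => hyx (htall y hz))
      rw [hsplit]
      simp [List.count_cons, List.count_append, ht0]
      exact fun e => hyx e.symm
    by_cases hrun : t.isEmpty = true
    · -- run of length 1: add x, recurse on d
      have htnil : t = [] := List.isEmpty_iff.mp hrun
      have hstep : pvSingles s (x :: rest) = pvSingles (PySem.Set.add s x) d := by
        rw [pvSingles]; simp [← ht, ← hd, hrun]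
      rw [hstep]
      have ih := pv_singles_mem y d (PySem.Set.add s x) hdsorted
      rw [ih]
      have hmemadd : y ∈ PySem.Set.add s x ↔ y ∈ s ∨ y = x := by
        by_cases h : x ∈ s
        · simp [PySem.Set.add, h]
          intro e; rw [e]; exact h
        · simp [PySem.Set.add, h]
      rw [hmemadd]
      by_cases hyx : y = x
      · subst hyx
        have : (y :: rest).count y = 1 := by rw [hcx, htnil]; rfl
        simp [this]
      · have := hcy hyx
        rw [this]
        tauto
    · -- run longer than 1: x is not a singleton, recurse on d
      have hstep : pvSingles s (x :: rest) = pvSingles s d := by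
        rw [pvSingles]; simp [← ht, ← hd, hrun]
      rw [hstep]
      have ih := pv_singles_mem y d s hdsorted
      rw [ih]
      by_cases hyx : y = x
      · subst hyx
        have htne : t ≠ [] := by simpa using hrun
        have htlen : 1 ≤ t.length := List.length_pos_of_ne_nil htne
        have h1 : (y :: rest).count y ≠ 1 := by rw [hcx]; omega
        have h2 : d.count y = 0 := List.count_eq_zero.mpr hxd
        constructor
        · rintro (h | h)
          · exact Or.inl h
          · omega
        · rintro (h | h)
          · exact Or.inl h
          · exact absurd h h1
      · rw [hcy hyx]
  termination_by S => S.length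
  decreasing_by
    all_goals simpa [hd] using Nat.lt_succ_of_le (List.length_dropWhile_le (fun y => y == x) rest)

lemma pvFindIn_eq_find? (s : PySem.Set Int) (l : List Int) :
    pvFindIn s l = (l.find? (fun x => s.contains x)).getD 0 := by
  induction l with
  | nil => rfl
  | cons x rest ih =>
    by_cases h : x ∈ s <;> simp [pvFindIn, List.find?, h, ih]

lemma pv_freq_map_alt_eq_find? (A : List Int) :
    freq_map_alt A = (A.find? (fun x => PySem.List.count A x == 1)).getD 0 := by
  unfold freq_map_alt
  rw [pvFindIn_eq_find?]
  congr 1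
  apply pv_find?_congr_mem
  intro x _
  have hperm : (PySem.List.sorted A (fun x => x) false).Perm A := PySem.List.sorted_perm A _ _
  have hsorted : (PySem.List.sorted A (fun x => x) false).Pairwise (· ≤ ·) := by
    have := PySem.List.sorted_pairwise A (fun x => x) (κ := Int)
    simpa using this
  have hmem := pv_singles_mem x (PySem.List.sorted A (fun x => x) false) PySem.Set.empty hsorted
  have hcount : (PySem.List.sorted A (fun x => x) false).count x = A.count x := hperm.count_eq x
  have hemp : x ∉ (PySem.Set.empty : PySem.Set Int) := by simp [PySem.Set.empty]
  have hpc : PySem.List.count A x = List.count x A := rfl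
  by_cases h : A.count x = 1
  · have hin : x ∈ pvSingles PySem.Set.empty (PySem.List.sorted A (fun x => x) false) := by
      rw [hmem, hcount]; right; exact h
    have hc1 : (PySem.List.count A x == 1) = true := by
      rw [hpc]; simpa using h
    rw [hc1]
    simpa using hin
  · have hnin : x ∉ pvSingles PySem.Set.empty (PySem.List.sorted A (fun x => x) false) := by
      rw [hmem, hcount]; rintro (h1 | h2)
      · exact hemp h1
      · exact h h2
    have hc0 : (PySem.List.count A x == 1) = false := by
      rw [hpc]; simpa using h
    rw [hc0]
    simpa using hnin

-- ===== VERDICT (by name: the statement is the Claim_ definition above) =====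
theorem freq_map_spec : Claim_equal_freq_map := by
  intro A _
  unfold Spec_freq_map
  rw [pv_freq_map_eq_find?, pv_freq_map_alt_eq_find?]
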